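-- pv_equiv track=rewrite | github.com/ShadowRaven14/High-School-Python-Matura | 73/xxx (3).py | sortowanie6
-- ===== SOURCE A (Python) =====
-- def smallest_prime_factor(n):
--     for i in range(2, n // 2 + 1):
--         if n % i == 0:
--             return i
--     return n
--
-- def sortowanie6(list):
--     finished = False
--     while not finished:
--         finished = True
--         for i in range(1, len(list)):
--             if smallest_prime_factor(list[i - 1]) > smallest_prime_factor(list[i]):
--                 finished = False
--                 n = list[i - 1]
--                 list[i - 1] = list[i]
--                 list[i] = n
--     return list
-- ===== SOURCE B (Python) =====
-- def smallest_prime_factor(n):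
--     for i in range(2, n // 2 + 1):
--         if n % i == 0:
--             return i
--     return n
--
-- def sortowanie6(list):
--     buckets = {}
--     for x in list:
--         buckets.setdefault(smallest_prime_factor(x), []).append(x)
--     result = []
--     for k in sorted(buckets):
--         result.extend(buckets[k])
--     list[:] = result
--     return list
-- ===== Notes on version B (the rewrite author's own statement) =====
-- stated objective: faster
-- what changed: Replaces A's repeated bubble-sort passes (recomputing smallest_prime_factor for every comparison) by a single pass that groups elements into a dict of buckets keyed by smallest_prime_factor, then concatenates the buckets in sorted key order; both mutate the argument list in place.
import Mathlib
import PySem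

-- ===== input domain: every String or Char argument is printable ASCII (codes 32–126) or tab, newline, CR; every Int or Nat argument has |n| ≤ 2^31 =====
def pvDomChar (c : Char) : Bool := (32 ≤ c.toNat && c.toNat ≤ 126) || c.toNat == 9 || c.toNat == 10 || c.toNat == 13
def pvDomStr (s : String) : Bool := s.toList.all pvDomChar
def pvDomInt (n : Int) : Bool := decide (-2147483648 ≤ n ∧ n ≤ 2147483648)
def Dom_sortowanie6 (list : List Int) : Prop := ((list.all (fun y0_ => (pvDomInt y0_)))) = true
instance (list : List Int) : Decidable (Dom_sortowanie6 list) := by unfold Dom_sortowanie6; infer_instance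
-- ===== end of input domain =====

-- B replaces A's bubble sort by one bucketing pass over the list (a dict keyed by smallest_prime_factor)
-- followed by concatenating the buckets in sorted key order: objective faster (one key computation per
-- element and no quadratic swap passes). Both A and B mutate the argument list in place the same way
-- (A by swaps, B by `list[:] = result`); the equivalence proved here is about the return value.

-- ===== PORT A =====
def spfLoop (n : Int) : List Int → Int
  | [] => n
  | i :: rest => if PySem.Int.mod n i = 0 then i else spfLoop n rest

def smallest_prime_factor (n : Int) : Int :=
  spfLoop n (PySem.List.pyRange 2 (PySem.Int.floordiv n 2 + 1) 1)

-- one in-place swap pass of A's while-loop body (for i in range(1, len(list)) with adjacent swaps);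
-- the Bool is A's `finished` flag after the pass
def bubblePass : List Int → List Int × Bool
  | [] => ([], true)
  | [x] => ([x], true)
  | x :: y :: t =>
    if smallest_prime_factor x > smallest_prime_factor y then
      (y :: (bubblePass (x :: t)).1, false)
    else
      (x :: (bubblePass (y :: t)).1, (bubblePass (y :: t)).2)
  termination_by l => l.length
  decreasing_by all_goals simp

-- A's `while not finished` loop; the fuel only makes the recursion structural (length+1 passes
-- always suffice, as the proofs below establish) — each unfolding is exactly one Python pass
def bubbleLoop : Nat → List Int → List Int
  | 0, l => l
  | fuel+1, l =>
    if (bubblePass l).2 then (bubblePass l).1 else bubbleLoop fuel (bubblePass l).1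

def sortowanie6 (list : List Int) : List Int := bubbleLoop (list.length + 1) list

-- ===== PORT B =====
def sortowanie6_alt (list : List Int) : List Int :=
  let buckets : PySem.Dict Int (List Int) :=
    list.foldl (fun d x => d.modify (smallest_prime_factor x) [] (fun b => b ++ [x])) PySem.Dict.empty
  (PySem.List.sorted buckets.keys (fun x => x)).foldl (fun acc k => acc ++ buckets.getD k []) []

-- ===== PRECONDITION & SPEC =====
def Spec_sortowanie6 (list : List Int) (out : List Int) : Prop := out = sortowanie6_alt list
instance (list : List Int) (out : List Int) : Decidable (Spec_sortowanie6 list out) := by unfold Spec_sortowanie6; infer_instance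

-- ===== CLAIM (what is proved, stated in full; the proofs are below) =====
def Claim_equal_sortowanie6 : Prop := ∀ (list : List Int), Dom_sortowanie6 list → Spec_sortowanie6 list (sortowanie6 list)

-- ===== LEMMAS AND PROOFS =====

-- the elements of l whose smallest_prime_factor is v, in order (the stability classes)
def keyFilter (v : Int) (l : List Int) : List Int :=
  l.filter (fun x => smallest_prime_factor x == v)

-- the key order relation
def KeyLE (a b : Int) : Prop := smallest_prime_factor a ≤ smallest_prime_factor b

lemma pass_filter (v : Int) (l : List Int) : keyFilter v (bubblePass l).1 = keyFilter v l := by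
  induction l using bubblePass.induct with
  | case1 => simp [bubblePass]
  | case2 x => simp [bubblePass]
  | case3 x y t h ih =>
    simp only [bubblePass, if_pos h]
    simp only [keyFilter, List.filter_cons] at ih ⊢
    by_cases hx : smallest_prime_factor x == v
    · have hy : (smallest_prime_factor y == v) = false := by
        rw [beq_eq_false_iff_ne]
        simp only [beq_iff_eq] at hx
        omega
      simp [hx, hy, ih]
    · simp only [Bool.not_eq_true] at hx
      simp [hx] at ih
      simp [hx, ih]
  | case4 x y t h ih =>
    simp only [bubblePass, if_neg h]
    simp only [keyFilter, List.filter_cons] at ih ⊢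
    by_cases hx : smallest_prime_factor x == v <;> simp [hx, ih]

lemma pass_fin_id (l : List Int) (h : (bubblePass l).2 = true) : (bubblePass l).1 = l := by
  induction l using bubblePass.induct with
  | case1 => simp [bubblePass]
  | case2 x => simp [bubblePass]
  | case3 x y t hc ih => simp [bubblePass, if_pos hc] at h
  | case4 x y t hc ih =>
    simp only [bubblePass, if_neg hc] at h ⊢
    simp [ih h]

lemma pass_fin_chain (l : List Int) (h : (bubblePass l).2 = true) : List.IsChain KeyLE l := by
  induction l using bubblePass.induct with
  | case1 => simp
  | case2 x => simp
  | case3 x y t hc ih => simp [bubblePass, if_pos hc] at h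
  | case4 x y t hc ih =>
    simp only [bubblePass, if_neg hc] at h
    exact List.isChain_cons_cons.mpr ⟨by unfold KeyLE; omega, ih h⟩

lemma pass_of_chain (l : List Int) (h : List.IsChain KeyLE l) : bubblePass l = (l, true) := by
  induction l using bubblePass.induct with
  | case1 => simp [bubblePass]
  | case2 x => simp [bubblePass]
  | case3 x y t hc ih =>
    have := (List.isChain_cons_cons.mp h).1
    unfold KeyLE at this
    omega
  | case4 x y t hc ih =>
    have := ih (List.isChain_cons_cons.mp h).2
    simp [bubblePass, if_neg hc, this]

lemma pass_grow : ∀ (n : Nat) (p s : List Int), p.length = n → p ≠ [] → List.IsChain KeyLE s →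
    (∀ x ∈ p, ∀ y ∈ s, KeyLE x y) →
    ∃ q c, (bubblePass (p ++ s)).1 = q ++ c :: s ∧ (q ++ [c]).Perm p ∧ ∀ z ∈ p, KeyLE z c := by
  intro n
  induction n with
  | zero =>
    intro p s hlen hne _ _
    cases p <;> simp_all
  | succ n ih =>
    intro p s hlen hne hchain hbound
    cases p with
    | nil => exact absurd rfl hne
    | cons x p2 =>
      cases p2 with
      | nil =>
        cases s with
        | nil =>
          refine ⟨[], x, by simp [bubblePass], List.Perm.refl _, ?_⟩
          intro z hz; simp at hz; subst hz; exact le_refl _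
        | cons y s' =>
          have hxy : KeyLE x y := hbound x (by simp) y (by simp)
          have hno : ¬ smallest_prime_factor x > smallest_prime_factor y := by
            unfold KeyLE at hxy; omega
          have hpc := pass_of_chain (y :: s') hchain
          refine ⟨[], x, ?_, List.Perm.refl _, ?_⟩
          · show (bubblePass ([x] ++ (y :: s'))).1 = [] ++ x :: y :: s'
            simp only [List.singleton_append, List.nil_append]
            simp [bubblePass, if_neg hno, hpc]
          · intro z hz; simp at hz; subst hz; exact le_refl _
      | cons y p' =>
        by_cases hgt : smallest_prime_factor x > smallest_prime_factor y
        · have hlen' : (x :: p').length = n := by simp at hlen ⊢; omega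
          obtain ⟨q, c, h1, h2, h3⟩ := ih (x :: p') s hlen' (by simp) hchain
            (fun z hz w hw => hbound z (by simp only [List.mem_cons] at hz ⊢; tauto) w hw)
          refine ⟨y :: q, c, ?_, ?_, ?_⟩
          · show (bubblePass (x :: y :: (p' ++ s))).1 = (y :: q) ++ c :: s
            simp only [bubblePass, if_pos hgt]
            simp only [List.cons_append] at h1 ⊢
            simp [h1]
          · simp only [List.cons_append]
            exact (h2.cons y).trans (List.Perm.swap x y p')
          · intro z hz
            simp only [List.mem_cons] at hz
            rcases hz with rfl | rfl | hz
            · exact h3 z (by simp)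
            · have hxc := h3 x (by simp)
              unfold KeyLE at hxc ⊢; omega
            · exact h3 z (by simp only [List.mem_cons]; tauto)
        · have hlen' : (y :: p').length = n := by simp at hlen ⊢; omega
          obtain ⟨q, c, h1, h2, h3⟩ := ih (y :: p') s hlen' (by simp) hchain
            (fun z hz w hw => hbound z (by simp only [List.mem_cons] at hz ⊢; tauto) w hw)
          refine ⟨x :: q, c, ?_, ?_, ?_⟩
          · show (bubblePass (x :: y :: (p' ++ s))).1 = (x :: q) ++ c :: s
            simp only [bubblePass, if_neg hgt]
            simp only [List.cons_append] at h1 ⊢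
            simp [h1]
          · simp only [List.cons_append]
            exact h2.cons x
          · intro z hz
            simp only [List.mem_cons] at hz
            rcases hz with rfl | rfl | hz
            · have hyc := h3 y (by simp)
              unfold KeyLE at hyc ⊢; omega
            · exact h3 z (by simp)
            · exact h3 z (by simp only [List.mem_cons]; tauto)

lemma loop_chain : ∀ (fuel : Nat) (p s : List Int), p.length < fuel → List.IsChain KeyLE s →
    (∀ x ∈ p, ∀ y ∈ s, KeyLE x y) → List.IsChain KeyLE (bubbleLoop fuel (p ++ s)) := by
  intro fuel
  induction fuel with
  | zero => intro p s hlen _ _; omega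
  | succ f ih =>
    intro p s hlen hchain hbound
    simp only [bubbleLoop]
    by_cases hfin : (bubblePass (p ++ s)).2 = true
    · rw [if_pos hfin, pass_fin_id _ hfin]
      exact pass_fin_chain _ hfin
    · rw [if_neg hfin]
      have hpne : p ≠ [] := by
        rintro rfl
        simp only [List.nil_append] at hfin
        rw [pass_of_chain s hchain] at hfin
        exact hfin rfl
      obtain ⟨q, c, h1, h2, h3⟩ := pass_grow p.length p s rfl hpne hchain hbound
      rw [h1]
      have hc_mem : c ∈ p := h2.subset (by simp)
      have hq_sub : ∀ z ∈ q, z ∈ p := fun z hz => h2.subset (by simp [hz])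
      have hlq : q.length + 1 = p.length := by
        have := h2.length_eq; simpa using this
      have hplen : 0 < p.length := by cases p <;> simp_all
      exact ih q (c :: s) (by omega)
        (by
          cases s with
          | nil => simp
          | cons y s' =>
            exact List.isChain_cons_cons.mpr ⟨hbound c hc_mem y (by simp), hchain⟩)
        (by
          intro z hz w hw
          simp only [List.mem_cons] at hw
          rcases hw with rfl | hw
          · exact h3 z (hq_sub z hz)
          · exact hbound z (hq_sub z hz) w hw)

lemma loop_filter : ∀ (fuel : Nat) (l : List Int) (v : Int),
    keyFilter v (bubbleLoop fuel l) = keyFilter v l := by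
  intro fuel
  induction fuel with
  | zero => intro l v; rfl
  | succ f ih =>
    intro l v
    simp only [bubbleLoop]
    split_ifs
    · exact pass_filter v l
    · rw [ih, pass_filter]

lemma a_pairwise (l : List Int) : (sortowanie6 l).Pairwise KeyLE := by
  haveI : Trans KeyLE KeyLE KeyLE := ⟨fun h1 h2 => le_trans h1 h2⟩
  have := loop_chain (l.length + 1) l [] (by omega) (by simp) (by simp)
  rw [List.append_nil] at this
  exact this.pairwise

lemma a_filter (l : List Int) (v : Int) : keyFilter v (sortowanie6 l) = keyFilter v l := by
  exact loop_filter (l.length + 1) l v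

-- ===== B side =====

def bucketsOf (l : List Int) : PySem.Dict Int (List Int) :=
  l.foldl (fun d x => d.modify (smallest_prime_factor x) [] (fun b => b ++ [x])) PySem.Dict.empty

lemma buckets_getD (l : List Int) (v : Int) : (bucketsOf l).getD v [] = keyFilter v l := by
  unfold bucketsOf keyFilter
  have hmap : l.foldl (fun d x => d.modify (smallest_prime_factor x) [] (fun b => b ++ [x]))
        PySem.Dict.empty
      = (l.map (fun x => (smallest_prime_factor x, x))).foldl
          (fun d p => d.modify p.1 [] (fun b => b ++ [p.2])) PySem.Dict.empty := by
    rw [List.foldl_map]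
  rw [hmap, PySem.Dict.getD_foldl_modify_append, PySem.Dict.getD_empty, List.filter_map,
    List.map_map]
  simp [Function.comp_def]

lemma buckets_keys_nodup (l : List Int) : (bucketsOf l).keys.Nodup := by
  unfold bucketsOf
  exact PySem.Dict.nodup_keys_foldl_modify_key l smallest_prime_factor []
    (fun _ x b => b ++ [x]) PySem.Dict.empty (by simp)

lemma mem_buckets_keys (l : List Int) (v : Int) :
    v ∈ (bucketsOf l).keys ↔ v ∈ l.map smallest_prime_factor := by
  unfold bucketsOf
  rw [PySem.Dict.keys_foldl_modify_key l smallest_prime_factor []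
    (fun _ x b => b ++ [x]) PySem.Dict.empty, PySem.Dict.keys_empty]
  have : PySem.Set.update ([] : List Int) (l.map smallest_prime_factor)
      = PySem.Set.ofList (l.map smallest_prime_factor) := by
    rw [PySem.Set.ofList_eq_foldl]; rfl
  rw [this, PySem.Set.mem_ofList]

lemma alt_flatMap (l : List Int) :
    sortowanie6_alt l =
      (PySem.List.sorted (bucketsOf l).keys (fun x => x)).flatMap (fun v => keyFilter v l) := by
  show (PySem.List.sorted (bucketsOf l).keys (fun x => x)).foldl
      (fun acc k => acc ++ (bucketsOf l).getD k []) [] = _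
  rw [PySem.List.foldl_append_eq_flatMap, List.nil_append]
  have hg : (fun v => (bucketsOf l).getD v []) = fun v => keyFilter v l :=
    funext (buckets_getD l)
  rw [hg]

lemma b_pairwise (l : List Int) : (sortowanie6_alt l).Pairwise KeyLE := by
  rw [alt_flatMap]
  refine List.pairwise_flatMap.mpr ⟨?_, ?_⟩
  · intro v _
    apply List.pairwise_of_forall_mem_list
    intro a ha b hb
    rw [keyFilter, List.mem_filter, beq_iff_eq] at ha hb
    unfold KeyLE
    omega
  · refine (PySem.List.sorted_pairwise (bucketsOf l).keys (fun x => x)).imp ?_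
    intro v w hvw a ha b hb
    rw [keyFilter, List.mem_filter, beq_iff_eq] at ha hb
    unfold KeyLE
    omega

lemma kf_kf (v w : Int) (l : List Int) :
    keyFilter v (keyFilter w l) = if w = v then keyFilter v l else [] := by
  unfold keyFilter
  rw [List.filter_filter]
  split_ifs with h
  · subst h
    exact List.filter_congr (fun x _ => by rw [Bool.and_self])
  · rw [List.filter_eq_nil_iff]
    intro a _
    simp only [Bool.and_eq_true, beq_iff_eq, not_and]
    intro h1 h2
    exact h (h2.symm.trans h1)

lemma flatMap_ite (v : Int) (m : List Int) :
    ∀ (K : List Int), K.Nodup →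
      K.flatMap (fun w => if w = v then m else []) = if v ∈ K then m else [] := by
  intro K
  induction K with
  | nil => simp
  | cons a K' ih =>
    intro hnd
    rw [List.nodup_cons] at hnd
    rw [List.flatMap_cons, ih hnd.2]
    by_cases hav : a = v
    · subst hav
      simp [hnd.1]
    · simp only [if_neg hav, List.nil_append, List.mem_cons]
      by_cases hv : v ∈ K' <;> simp [hv, Ne.symm hav]

lemma b_filter (l : List Int) (v : Int) : keyFilter v (sortowanie6_alt l) = keyFilter v l := by
  rw [alt_flatMap]
  have : keyFilter v ((PySem.List.sorted (bucketsOf l).keys fun x => x).flatMap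
      fun w => keyFilter w l)
      = (PySem.List.sorted (bucketsOf l).keys fun x => x).flatMap
          (fun w => keyFilter v (keyFilter w l)) := by
    unfold keyFilter
    rw [List.filter_flatMap]
  rw [this]
  have hK : ((PySem.List.sorted (bucketsOf l).keys fun x => x)).Nodup :=
    ((PySem.List.sorted_perm (bucketsOf l).keys (fun x => x) false).symm.nodup
      (buckets_keys_nodup l))
  have hrw : (fun w => keyFilter v (keyFilter w l))
      = fun w => if w = v then keyFilter v l else [] := funext (fun w => kf_kf v w l)
  rw [hrw, flatMap_ite v (keyFilter v l) _ hK]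
  split_ifs with hmem
  · rfl
  · rw [PySem.List.mem_sorted, mem_buckets_keys] at hmem
    symm
    rw [keyFilter, List.filter_eq_nil_iff]
    intro a ha
    rw [beq_iff_eq]
    intro hav
    exact hmem (List.mem_map.mpr ⟨a, ha, hav⟩)

-- ===== uniqueness of the stable key-sorted rearrangement =====

lemma stable_unique_aux : ∀ (r1 r2 : List Int), r1.Perm r2 → r1.Pairwise KeyLE →
    r2.Pairwise KeyLE → (∀ v, keyFilter v r1 = keyFilter v r2) → r1 = r2 := by
  intro r1
  induction r1 with
  | nil =>
    intro r2 hperm _ _ _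
    cases r2 with
    | nil => rfl
    | cons b t2 => exact absurd hperm.length_eq (by simp)
  | cons a t1 ih =>
    intro r2 hperm h1 h2 hfil
    cases r2 with
    | nil => exact absurd hperm.length_eq (by simp)
    | cons b t2 =>
      have hbmem : b ∈ a :: t1 := hperm.symm.subset (by simp)
      have hamem : a ∈ b :: t2 := hperm.subset (by simp)
      obtain ⟨h1a, h1t⟩ := List.pairwise_cons.mp h1
      obtain ⟨h2b, h2t⟩ := List.pairwise_cons.mp h2
      have hk1 : ∀ z ∈ a :: t1, smallest_prime_factor a ≤ smallest_prime_factor z := by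
        intro z hz
        simp only [List.mem_cons] at hz
        rcases hz with rfl | hz
        · exact le_refl _
        · exact h1a z hz
      have hk2 : ∀ z ∈ b :: t2, smallest_prime_factor b ≤ smallest_prime_factor z := by
        intro z hz
        simp only [List.mem_cons] at hz
        rcases hz with rfl | hz
        · exact le_refl _
        · exact h2b z hz
      have hkab : smallest_prime_factor a = smallest_prime_factor b :=
        le_antisymm (hk1 b hbmem) (hk2 a hamem)
      have hcons := hfil (smallest_prime_factor a)
      rw [keyFilter, keyFilter, List.filter_cons, List.filter_cons] at hcons
      rw [if_pos (by simp), if_pos (by rw [beq_iff_eq]; exact hkab.symm)] at hcons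
      obtain ⟨rfl, htfil⟩ := List.cons.injEq .. ▸ hcons  -- a = b and tail filters at spf a
      have htfils : ∀ v, keyFilter v t1 = keyFilter v t2 := by
        intro v
        by_cases hv : smallest_prime_factor a = v
        · subst hv; exact htfil
        · have := hfil v
          rw [keyFilter, keyFilter, List.filter_cons, List.filter_cons,
            if_neg (by simp [hv]), if_neg (by simp [hv])] at this
          exact this
      rw [ih t2 hperm.cons_inv h1t h2t htfils]

lemma stable_unique : ∀ (r1 r2 : List Int), r1.Pairwise KeyLE → r2.Pairwise KeyLE →
    (∀ v, keyFilter v r1 = keyFilter v r2) → r1 = r2 := by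
  intro r1 r2 h1 h2 hfil
  have hperm : r1.Perm r2 := by
    rw [List.perm_iff_count]
    intro a
    have hc1 : List.count a (keyFilter (smallest_prime_factor a) r1) = List.count a r1 :=
      List.count_filter (by simp)
    have hc2 : List.count a (keyFilter (smallest_prime_factor a) r2) = List.count a r2 :=
      List.count_filter (by simp)
    rw [← hc1, ← hc2, hfil]
  exact stable_unique_aux r1 r2 hperm h1 h2 hfil

-- ===== VERDICT (by name: the statement is the Claim_ definition above) =====
theorem sortowanie6_spec : Claim_equal_sortowanie6 := by
  intro l _
  unfold Spec_sortowanie6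
  exact stable_unique _ _ (a_pairwise l) (b_pairwise l)
    (fun v => (a_filter l v).trans (b_filter l v).symm)
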